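-- pv_equiv track=rewrite | github.com/pdxgitit/StudentWork | Carolyn/cryptogramtest.py | make_dash
-- ===== SOURCE A (Python) =====
-- def make_dash(string):
--     out_string = ''
--     for char in string:
--         if char != ' ':
--             out_string += '-'
--         else:
--             out_string += char
--     return out_string
-- ===== SOURCE B (Python) =====
-- def make_dash(string):
--     return ' '.join('-' * len(part) for part in string.split(' '))
-- ===== Notes on version B (the rewrite author's own statement) =====
-- stated objective: faster
-- what changed: Replaced the per-character loop with a branch and repeated string concatenation by a split-on-space / map-to-dash-runs / join pipeline.
import Mathlib
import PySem

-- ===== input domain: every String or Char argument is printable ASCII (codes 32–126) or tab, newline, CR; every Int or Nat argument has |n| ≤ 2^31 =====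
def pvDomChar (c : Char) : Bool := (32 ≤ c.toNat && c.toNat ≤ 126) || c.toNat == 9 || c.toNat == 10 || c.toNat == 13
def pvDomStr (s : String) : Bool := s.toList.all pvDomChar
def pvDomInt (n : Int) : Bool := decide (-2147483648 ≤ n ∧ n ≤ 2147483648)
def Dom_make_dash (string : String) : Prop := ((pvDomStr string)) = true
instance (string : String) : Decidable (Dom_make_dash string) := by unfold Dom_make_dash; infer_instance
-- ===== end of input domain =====

-- B replaces A's per-character loop-with-branch by a split(' ') / map-to-dash-runs / join(' ') pipeline (measured faster at the check's largest sizes; return value only, no mutation involved).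

-- ===== PORT A =====
-- for char in string: out_string += '-' if char != ' ' else char
def make_dash (string : String) : String :=
  String.ofList (string.toList.foldl
    (fun out_string char => out_string ++ (if char ≠ ' ' then ['-'] else [char])) [])

-- ===== PORT B =====
-- ' '.join('-' * len(part) for part in string.split(' '))
def make_dash_alt (string : String) : String :=
  String.ofList (PySem.Chars.join [' ']
    ((PySem.Chars.splitOn string.toList [' ']).map (fun part => List.replicate part.length '-')))

-- ===== PRECONDITION & SPEC =====
def Spec_make_dash (string : String) (out : String) : Prop := out = make_dash_alt string
instance (string : String) (out : String) : Decidable (Spec_make_dash string out) := by unfold Spec_make_dash; infer_instance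

-- ===== CLAIM (what is proved, stated in full; the proofs are below) =====
def Claim_equal_make_dash : Prop := ∀ (string : String), Dom_make_dash string → Spec_make_dash string (make_dash string)

-- ===== LEMMAS AND PROOFS =====

-- the character transformation both programs realise
def pvDashChar (c : Char) : Char := if c ≠ ' ' then '-' else c

-- fuel-free split on a single space, carrying the current piece
def pvSplitSp (cur : List Char) : List Char → List (List Char)
  | [] => [cur]
  | c :: rest => if c = ' ' then cur :: pvSplitSp [] rest else pvSplitSp (cur ++ [c]) rest

theorem pvFoldA (l : List Char) (acc : List Char) :
    l.foldl (fun out_string char => out_string ++ (if char ≠ ' ' then ['-'] else [char])) acc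
      = acc ++ l.map pvDashChar := by
  induction l generalizing acc with
  | nil => simp
  | cons c rest ih =>
      rw [List.foldl_cons, ih]
      by_cases hc : c = ' ' <;> simp [pvDashChar, hc]

theorem pvGoEq (fuel : Nat) (l cur : List Char) (acc : List (List Char))
    (h : l.length ≤ fuel) :
    PySem.Chars.splitOn.go [' '] fuel l cur acc
      = acc.reverse ++ pvSplitSp cur.reverse l := by
  induction fuel generalizing l cur acc with
  | zero =>
      have : l = [] := List.eq_nil_of_length_eq_zero (Nat.le_zero.mp h)
      subst this
      simp [PySem.Chars.splitOn.go, pvSplitSp]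
  | succ n ih =>
      cases l with
      | nil => simp [PySem.Chars.splitOn.go, pvSplitSp]
      | cons c rest =>
          simp only [PySem.Chars.splitOn.go]
          by_cases hc : c = ' '
          · subst hc
            have hp : List.isPrefixOf [' '] (' ' :: rest) = true := by
              simp [List.isPrefixOf]
            rw [if_pos hp]
            have := ih (List.drop 1 (' ' :: rest)) [] (cur.reverse :: acc)
              (by simpa using Nat.le_of_succ_le_succ h)
            simpa [pvSplitSp] using this
          · have hp : List.isPrefixOf [' '] (c :: rest) = false := by
              simp only [List.isPrefixOf, Bool.and_eq_false_iff]
              left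
              simpa using fun h => hc h.symm
            rw [if_neg (by simp [hp])]
            have := ih rest (c :: cur) acc (Nat.le_of_succ_le_succ h)
            simpa [pvSplitSp, hc] using this

theorem pvSplit_ne_nil (l cur : List Char) : pvSplitSp cur l ≠ [] := by
  induction l generalizing cur with
  | nil => simp [pvSplitSp]
  | cons c rest ih => by_cases hc : c = ' ' <;> simp [pvSplitSp, hc, ih]

theorem pvJoinSplit (l cur : List Char) :
    PySem.Chars.join [' '] ((pvSplitSp cur l).map (fun p => List.replicate p.length '-'))
      = List.replicate cur.length '-' ++ l.map pvDashChar := by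
  induction l generalizing cur with
  | nil => simp [pvSplitSp, PySem.Chars.join, List.intercalate]
  | cons c rest ih =>
      by_cases hc : c = ' '
      · subst hc
        obtain ⟨a, t, he⟩ := List.exists_cons_of_ne_nil (pvSplit_ne_nil rest ([] : List Char))
        have h2 := ih ([] : List Char)
        rw [show pvSplitSp cur (' ' :: rest) = cur :: pvSplitSp [] rest from by
          simp [pvSplitSp]]
        rw [he] at h2 ⊢
        simp only [List.map_cons]
        rw [PySem.Chars.join_cons_cons]
        simp only [List.map_cons] at h2
        simp [h2, pvDashChar]
      · simp only [pvSplitSp, if_neg hc]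
        rw [ih (cur ++ [c])]
        simp [pvDashChar, hc, List.replicate_succ']

theorem make_dash_eq (s : String) : make_dash s = make_dash_alt s := by
  unfold make_dash make_dash_alt PySem.Chars.splitOn
  rw [pvFoldA, pvGoEq (s.toList.length + 1) s.toList [] [] (by omega)]
  simp [pvJoinSplit]

-- ===== VERDICT (by name: the statement is the Claim_ definition above) =====
theorem make_dash_spec : Claim_equal_make_dash := by
  intro s _
  exact make_dash_eq s
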